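-- pv_equiv track=rewrite | github.com/lilyzhouZYJ/llms_txt_generator | src/formatter.py | group_by_section
-- ===== SOURCE A (Python) =====
-- def group_by_section(
--     pages: list[dict],
--     section_order: list[str] | None = None,
-- ) -> dict[str, list[dict]]:
--     """
--     Group pages by section.
--
--     If ``section_order`` is set (from the section-refine LLM pass), sections appear in that
--     order; any section not listed is appended alphabetically.
--
--     If ``section_order`` is ``None``, sections are sorted alphabetically by name.
--     """
--     groups: dict[str, list[dict]] = {}
--     for p in pages:
--         sec = p.get("section", "Pages")
--         if sec not in groups:
--             groups[sec] = []
--         groups[sec].append(p)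
--
--     if section_order is None:
--         return dict(sorted(groups.items()))
--
--     ordered: dict[str, list[dict]] = {}
--     seen: set[str] = set()
--     for sec in section_order:
--         if sec in groups and sec not in seen:
--             ordered[sec] = groups[sec]
--             seen.add(sec)
--     remaining = sorted(set(groups.keys()) - seen)
--     for sec in remaining:
--         ordered[sec] = groups[sec]
--     return ordered
-- ===== SOURCE B (Python) =====
-- def group_by_section(
--     pages: list[dict],
--     section_order: list[str] | None = None,
-- ) -> dict[str, list[dict]]:
--     # Compute the final key order first, then build each group by filtering
--     # the pages (no intermediate grouping dict).
--     present = []  # distinct section names, first-occurrence order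
--     for p in pages:
--         s = p.get("section", "Pages")
--         if s not in present:
--             present.append(s)
--     if section_order is None:
--         keys = sorted(present)
--     else:
--         listed = [s for s in dict.fromkeys(section_order) if s in present]
--         keys = listed + sorted(s for s in present if s not in section_order)
--     return {k: [p for p in pages if p.get("section", "Pages") == k] for k in keys}
-- ===== Notes on version B (the rewrite author's own statement) =====
-- stated objective: simpler
-- what changed: Instead of hash-grouping pages into a dict and then re-ordering its keys through a seen-set and a set difference, B first computes the final ordered key list (first-occurrence sections, filtered/deduplicated section_order plus sorted remainder) and then builds each group by filtering the pages per key.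
import Mathlib
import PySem

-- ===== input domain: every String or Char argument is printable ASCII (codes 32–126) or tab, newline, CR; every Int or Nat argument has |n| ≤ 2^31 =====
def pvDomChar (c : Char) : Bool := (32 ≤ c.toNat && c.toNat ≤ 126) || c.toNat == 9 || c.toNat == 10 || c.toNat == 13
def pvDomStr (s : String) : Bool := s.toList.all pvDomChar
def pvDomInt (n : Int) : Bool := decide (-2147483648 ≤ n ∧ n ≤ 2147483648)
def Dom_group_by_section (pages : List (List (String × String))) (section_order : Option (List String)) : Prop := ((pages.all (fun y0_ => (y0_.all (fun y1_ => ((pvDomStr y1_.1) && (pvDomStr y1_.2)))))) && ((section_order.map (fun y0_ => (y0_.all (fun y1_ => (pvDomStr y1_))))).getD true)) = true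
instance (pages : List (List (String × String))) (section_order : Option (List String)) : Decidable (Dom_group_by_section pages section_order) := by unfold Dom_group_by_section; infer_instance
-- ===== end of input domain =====

-- B computes the final ordered key list first and builds each group by filtering the pages
-- per key, instead of A's hash-grouping into a dict followed by re-ordering its keys
-- (objective: simpler; same return value).

-- shared helper: p.get("section", "Pages") on a page dict
def pvGetSection (p : List (String × String)) : String :=
  (PySem.Dict.mk p).getD "section" "Pages"

-- ===== PORT A =====
def group_by_section (pages : List (List (String × String))) (section_order : Option (List String)) : List (String × List (List (String × String))) :=
  let groups : PySem.Dict String (List (List (String × String))) :=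
    pages.foldl (fun d p =>
      (if d.contains (pvGetSection p) then d else d.insert (pvGetSection p) []).modify
        (pvGetSection p) [] (fun l => l ++ [p])) PySem.Dict.empty
  match section_order with
  | none =>
      -- sorted(groups.items()): the keys are distinct, so Python's tuple comparison
      -- orders the pairs by the key alone — exact here
      PySem.List.sorted groups.items (fun kv => kv.1) false
  | some so =>
      let st := so.foldl
        (fun (st : PySem.Dict String (List (List (String × String))) × PySem.Set String) s =>
          if groups.contains s && !(PySem.Set.contains st.2 s) then
            (st.1.insert s (groups.getD s []), PySem.Set.add st.2 s)
          else st)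
        (PySem.Dict.empty, PySem.Set.empty)
      let remaining := PySem.List.sorted (PySem.Set.diff (PySem.Set.ofList groups.keys) st.2) (fun x => x) false
      (remaining.foldl (fun d s => d.insert s (groups.getD s [])) st.1).items

-- ===== PORT B =====
def group_by_section_alt (pages : List (List (String × String))) (section_order : Option (List String)) : List (String × List (List (String × String))) :=
  let present : PySem.Set String :=
    pages.foldl (fun acc p => PySem.Set.add acc (pvGetSection p)) PySem.Set.empty
  let keys : List String :=
    match section_order with
    | none => PySem.List.sorted present (fun x => x) false
    | some so =>
        let listed := (PySem.List.dedup so).filter (fun s => present.contains s)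
        listed ++ PySem.List.sorted (present.filter (fun s => !so.contains s)) (fun x => x) false
  -- the keys are distinct, so the Python dict comprehension is this map — exact
  keys.map (fun k => (k, pages.filter (fun p => pvGetSection p == k)))

-- ===== PRECONDITION & SPEC =====
def Spec_group_by_section (pages : List (List (String × String))) (section_order : Option (List String)) (out : List (String × List (List (String × String)))) : Prop := out = group_by_section_alt pages section_order
instance (pages : List (List (String × String))) (section_order : Option (List String)) (out : List (String × List (List (String × String)))) : Decidable (Spec_group_by_section pages section_order out) := by unfold Spec_group_by_section; infer_instance

-- ===== CLAIM (what is proved, stated in full; the proofs are below) =====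
def Claim_equal_group_by_section : Prop := ∀ (pages : List (List (String × String))) (section_order : Option (List String)), Dom_group_by_section pages section_order → Spec_group_by_section pages section_order (group_by_section pages section_order)

-- ===== LEMMAS AND PROOFS =====

-- proof-side abbreviations
def pvGroups (pages : List (List (String × String))) : PySem.Dict String (List (List (String × String))) :=
  pages.foldl (fun d p => d.modify (pvGetSection p) [] (fun l => l ++ [p])) PySem.Dict.empty

def pvPresent (pages : List (List (String × String))) : PySem.Set String :=
  PySem.Set.ofList (pages.map pvGetSection)

def pvF (pages : List (List (String × String))) (s : String) : String × List (List (String × String)) :=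
  (s, pages.filter (fun p => pvGetSection p == s))


theorem pv_mem_of_contains {L : List String} {x : String} (h : L.contains x = true) : x ∈ L := by
  simpa [List.contains_eq_mem] using h

theorem pv_not_mem_of_contains {L : List String} {x : String} (h : L.contains x = false) : x ∉ L := by
  simpa [List.contains_eq_mem] using h

theorem pv_scontains (s : PySem.Set String) (x : String) : PySem.Set.contains s x = decide (x ∈ s) := by
  unfold PySem.Set.contains
  exact List.contains_eq_mem x s

-- A's loop body: the 'if missing, insert []' step is absorbed by modify
theorem pv_setdefault_modify (d : PySem.Dict String (List (List (String × String)))) (s : String) (p : List (String × String)) :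
    (if d.contains s then d else d.insert s []).modify s [] (fun l => l ++ [p])
      = d.modify s [] (fun l => l ++ [p]) := by
  by_cases h : d.contains s = true
  · simp [h]
  · have h' : d.contains s = false := by simpa using h
    simp only [h', Bool.false_eq_true, if_false]
    simp only [PySem.Dict.modify]
    rw [PySem.Dict.getD_insert_self, PySem.Dict.insert_insert_self,
        PySem.Dict.getD_of_not_contains d [] h']

-- groups as a single modify-fold
theorem pv_groups_eq (pages : List (List (String × String))) :
    pages.foldl (fun d p =>
      (if d.contains (pvGetSection p) then d else d.insert (pvGetSection p) []).modify
        (pvGetSection p) [] (fun l => l ++ [p])) PySem.Dict.empty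
    = pvGroups pages := by
  unfold pvGroups
  congr 1
  funext d p
  exact pv_setdefault_modify d (pvGetSection p) p

theorem pv_keys_groups (pages : List (List (String × String))) :
    (pvGroups pages).keys = pvPresent pages := by
  have h1 : (pvGroups pages).keys = PySem.Set.update PySem.Dict.empty.keys (pages.map pvGetSection) :=
    PySem.Dict.keys_foldl_modify_key pages pvGetSection [] (fun _ p l => l ++ [p]) PySem.Dict.empty
  rw [h1, PySem.Dict.keys_empty]
  exact PySem.Set.update_empty _

theorem pv_nodup_present (pages : List (List (String × String))) : (pvPresent pages).Nodup :=
  PySem.Set.nodup_ofList _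

theorem pv_getD_groups (pages : List (List (String × String))) (s : String) :
    (pvGroups pages).getD s [] = pages.filter (fun p => pvGetSection p == s) := by
  unfold pvGroups
  rw [show pages.foldl (fun d p => d.modify (pvGetSection p) [] (fun l => l ++ [p])) PySem.Dict.empty
      = (pages.map (fun p => (pvGetSection p, p))).foldl (fun d q => d.modify q.1 [] (fun l => l ++ [q.2])) PySem.Dict.empty
    by rw [List.foldl_map]]
  rw [PySem.Dict.getD_foldl_modify_append, PySem.Dict.getD_empty]
  simp [List.filter_map, List.map_map, Function.comp_def]

theorem pv_contains_groups (pages : List (List (String × String))) (s : String) :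
    (pvGroups pages).contains s = (pvPresent pages).contains s := by
  rw [PySem.Dict.contains_eq_decide_mem_keys, pv_keys_groups, pv_scontains]

-- B's present accumulator is pvPresent
theorem pv_present_eq (pages : List (List (String × String))) :
    pages.foldl (fun acc p => PySem.Set.add acc (pvGetSection p)) PySem.Set.empty = pvPresent pages := by
  simp only [pvPresent, PySem.Set.ofList, List.foldl_map]

-- filter commutes with Set.add and with the Set.add fold (dedup)
theorem pv_filter_add (p : String → Bool) (acc : PySem.Set String) (x : String) :
    (PySem.Set.add acc x).filter p
      = if p x then PySem.Set.add (acc.filter p) x else acc.filter p := by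
  by_cases hm : x ∈ acc
  · by_cases hp : p x = true
    · have h2 : x ∈ acc.filter p := List.mem_filter.mpr ⟨hm, hp⟩
      simp [PySem.Set.add, hm, hp, h2]
    · simp [PySem.Set.add, hm, hp]
  · have h2 : x ∉ acc.filter p := fun h => hm (List.mem_filter.mp h).1
    by_cases hp : p x = true
    · simp [PySem.Set.add, hm, hp, h2, List.filter_append]
    · simp [PySem.Set.add, hm, hp, List.filter_append]

theorem pv_filter_foldl_add (p : String → Bool) (l : List String) (acc : PySem.Set String) :
    (l.foldl PySem.Set.add acc).filter p = (l.filter p).foldl PySem.Set.add (acc.filter p) := by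
  induction l generalizing acc with
  | nil => simp
  | cons x t ih =>
    simp only [List.foldl_cons]
    rw [ih (PySem.Set.add acc x), pv_filter_add]
    by_cases hp : p x = true
    · simp [hp]
    · simp [hp]

theorem pv_dedup_filter (p : String → Bool) (l : List String) :
    PySem.List.dedup (l.filter p) = (PySem.List.dedup l).filter p := by
  have h := pv_filter_foldl_add p l []
  simpa [PySem.List.dedup, PySem.Set.ofList, PySem.Set.empty] using h.symm

-- the interleaved 'if listed and unseen' fold, as a fold of Set.add over a filter
theorem pv_foldL_eq (p : String → Bool) (so : List String) (L : PySem.Set String) :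
    so.foldl (fun L s => if p s then PySem.Set.add L s else L) L
      = (so.filter p).foldl PySem.Set.add L := by
  induction so generalizing L with
  | nil => rfl
  | cons s t ih =>
    by_cases h : p s = true
    · simp [h, ih]
    · simp [h, ih]

theorem pv_mk_keys (pages : List (List (String × String))) (L : List String) :
    (PySem.Dict.mk (L.map (pvF pages))).keys = L := by
  simp [PySem.Dict.keys, List.map_map, Function.comp_def, pvF]

theorem pv_mk_contains (pages : List (List (String × String))) (L : List String) (s : String) :
    (PySem.Dict.mk (L.map (pvF pages))).contains s = L.contains s := by
  rw [PySem.Dict.contains_eq_decide_mem_keys, pv_mk_keys, List.contains_eq_mem]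

-- A's ordered/seen pair fold carries exactly the picked key list
theorem pv_foldA (pages : List (List (String × String))) (so : List String) (L : List String)
    (hnd : L.Nodup) :
    so.foldl
      (fun (st : PySem.Dict String (List (List (String × String))) × PySem.Set String) s =>
        if (pvGroups pages).contains s && !(PySem.Set.contains st.2 s) then
          (st.1.insert s ((pvGroups pages).getD s []), PySem.Set.add st.2 s)
        else st)
      (PySem.Dict.mk (L.map (pvF pages)), L)
    = (PySem.Dict.mk ((so.foldl (fun L s => if (pvGroups pages).contains s then PySem.Set.add L s else L) L).map (pvF pages)),
       so.foldl (fun L s => if (pvGroups pages).contains s then PySem.Set.add L s else L) L) := by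
  induction so generalizing L with
  | nil => rfl
  | cons s t ih =>
    simp only [List.foldl_cons]
    by_cases hG : (pvGroups pages).contains s = true
    · by_cases hL : L.contains s = true
      · have hm : s ∈ L := pv_mem_of_contains hL
        have hadd : PySem.Set.add L s = L := by simp [PySem.Set.add, hm]
        have hcond : ((pvGroups pages).contains s && !(PySem.Set.contains (PySem.Dict.mk (L.map (pvF pages)), L).2 s)) = false := by
          simp [hm]
        rw [hcond]
        simp only [Bool.false_eq_true, if_false, hG, if_true, hadd]
        exact ih L hnd
      · have hLf : L.contains s = false := by simpa using hL
        have hm : s ∉ L := pv_not_mem_of_contains hLf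
        have hcond : ((pvGroups pages).contains s && !(PySem.Set.contains (PySem.Dict.mk (L.map (pvF pages)), L).2 s)) = true := by
          simp [hG, hm]
        rw [hcond]
        have h1 : (PySem.Dict.mk (L.map (pvF pages))).insert s ((pvGroups pages).getD s [])
            = PySem.Dict.mk ((L ++ [s]).map (pvF pages)) := by
          have hc : (PySem.Dict.mk (L.map (pvF pages))).contains s = false := by
            rw [pv_mk_contains]; exact hLf
          apply PySem.Dict.ext
          rw [PySem.Dict.items_insert_of_not_contains _ _ hc]
          simp [pvF, pv_getD_groups]
        have h2 : PySem.Set.add L s = L ++ [s] := by simp [PySem.Set.add, hm]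
        have hnd2 : (L ++ [s]).Nodup :=
          hnd.append (List.nodup_singleton s)
            (by intro a ha hb; rw [List.mem_singleton] at hb; subst hb; exact hm ha)
        simp only [if_true]
        rw [show ((PySem.Dict.mk (L.map (pvF pages)), L).1.insert s ((pvGroups pages).getD s []),
              PySem.Set.add (PySem.Dict.mk (L.map (pvF pages)), L).2 s)
            = (PySem.Dict.mk ((L ++ [s]).map (pvF pages)), L ++ [s]) by
          simp only []; rw [h1, h2]]
        simp only [hG, if_true, h2]
        exact ih (L ++ [s]) hnd2
    · have hGf : (pvGroups pages).contains s = false := by simpa using hG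
      have hcond : ((pvGroups pages).contains s && !(PySem.Set.contains (PySem.Dict.mk (L.map (pvF pages)), L).2 s)) = false := by
        simp [hGf]
      rw [hcond]
      simp only [Bool.false_eq_true, if_false, hGf]
      exact ih L hnd

-- the final insertion loop over fresh keys appends
theorem pv_items_foldl_insert (pages : List (List (String × String))) (R Kl : List String)
    (hfresh : ∀ a ∈ R, (PySem.Dict.mk (Kl.map (pvF pages))).contains a = false)
    (hnd : (R.map (fun a => a)).Nodup) :
    (R.foldl (fun d s => d.insert s ((pvGroups pages).getD s [])) (PySem.Dict.mk (Kl.map (pvF pages)))).items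
      = Kl.map (pvF pages) ++ R.map (fun s => (s, (pvGroups pages).getD s [])) :=
  PySem.Dict.items_foldl_insert_fresh R (fun a => a) (fun a => (pvGroups pages).getD a []) _ hfresh hnd

-- ===== VERDICT (by name: the statement is the Claim_ definition above) =====
theorem group_by_section_spec : Claim_equal_group_by_section := by
  intro pages section_order _
  unfold Spec_group_by_section
  cases section_order with
  | none =>
    simp only [group_by_section, group_by_section_alt]
    rw [pv_groups_eq, pv_present_eq]
    have hkeysnd : (pvGroups pages).keys.Nodup := by
      rw [pv_keys_groups]; exact pv_nodup_present pages
    have hitems : (pvGroups pages).items = (pvPresent pages).map (pvF pages) := by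
      rw [PySem.Dict.items_eq_map_keys (pvGroups pages) hkeysnd [], pv_keys_groups]
      exact List.map_congr_left (fun k _ => by simp [pvF, pv_getD_groups])
    rw [hitems, show (fun k => (k, pages.filter (fun p => pvGetSection p == k))) = pvF pages from rfl]
    apply PySem.List.sorted_eq_of_perm_of_pairwise_lt
    · exact (PySem.List.sorted_perm (pvPresent pages) (fun x => x) false).map (pvF pages)
    · rw [List.pairwise_map]
      have h := PySem.List.sorted_ofList_pairwise_lt (pages.map pvGetSection)
      simpa [pvPresent, pvF] using h
  | some so =>
    simp only [group_by_section, group_by_section_alt]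
    rw [pv_groups_eq, pv_present_eq]
    have hA := pv_foldA pages so [] List.nodup_nil
    rw [show (PySem.Dict.empty, PySem.Set.empty)
        = ((PySem.Dict.mk (([] : List String).map (pvF pages))), ([] : List String)) from rfl] at *
    rw [hA]
    have hK : so.foldl (fun L s => if (pvGroups pages).contains s then PySem.Set.add L s else L) []
        = (PySem.List.dedup so).filter (fun s => (pvPresent pages).contains s) := by
      rw [pv_foldL_eq ((pvGroups pages).contains ·) so []]
      rw [show (fun s => (pvGroups pages).contains s) = (fun s => (pvPresent pages).contains s) from
        funext (pv_contains_groups pages)]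
      rw [show (so.filter (fun s => (pvPresent pages).contains s)).foldl PySem.Set.add []
          = PySem.List.dedup (so.filter (fun s => (pvPresent pages).contains s)) from rfl]
      exact pv_dedup_filter _ so
    rw [hK]
    rw [show PySem.Set.ofList (pvGroups pages).keys = pvPresent pages by
      rw [pv_keys_groups]; exact PySem.Set.ofList_eq_self_of_nodup _ (pv_nodup_present pages)]
    set Kl := (PySem.List.dedup so).filter (fun s => (pvPresent pages).contains s) with hKl
    have hdiff : PySem.Set.diff (pvPresent pages) Kl
        = (pvPresent pages).filter (fun s => !so.contains s) := by
      apply List.filter_congr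
      intro x hx
      have hmem : (x ∈ Kl) ↔ x ∈ so := by
        rw [hKl]
        simp only [List.mem_filter, PySem.List.dedup, PySem.Set.mem_ofList]
        constructor
        · exact fun h => h.1
        · intro h
          refine ⟨h, ?_⟩
          rw [pv_scontains]; exact decide_eq_true hx
      simp [List.contains_eq_mem, hmem]
    rw [show PySem.Set.diff (pvPresent pages) Kl = (pvPresent pages).filter (fun x => !Kl.contains x) from rfl] at hdiff
    rw [show PySem.Set.diff (pvPresent pages) Kl = (pvPresent pages).filter (fun x => !Kl.contains x) from rfl]
    rw [hdiff]
    set R := PySem.List.sorted ((pvPresent pages).filter (fun s => !so.contains s)) (fun x => x) false with hR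
    have hRmem : ∀ a ∈ R, a ∉ so := by
      intro a ha
      rw [hR, PySem.List.mem_sorted] at ha
      have := (List.mem_filter.mp ha).2
      simpa [List.contains_eq_mem] using this
    have hfresh : ∀ a ∈ R, (PySem.Dict.mk (Kl.map (pvF pages))).contains a = false := by
      intro a ha
      rw [pv_mk_contains, List.contains_eq_mem]
      simp only [decide_eq_false_iff_not]
      intro hmem
      have : a ∈ so := by
        rw [hKl] at hmem
        have h1 := (List.mem_filter.mp hmem).1
        simp only [PySem.List.dedup, PySem.Set.mem_ofList] at h1
        exact h1
      exact hRmem a ha this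
    have hndR : (R.map (fun a => a)).Nodup := by
      have h1 : R.Nodup := by
        rw [hR]
        exact ((PySem.List.sorted_perm _ _ _).nodup_iff).mpr ((pv_nodup_present pages).filter _)
      simpa using h1
    rw [pv_items_foldl_insert pages R Kl hfresh hndR]
    rw [List.map_append]
    congr 1
    exact List.map_congr_left (fun a _ => by simp [pv_getD_groups])
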